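-- pv_equiv track=rewrite | github.com/arturo393/drs | src/plugins/drs.py | _decode_optical_port_status
-- ===== SOURCE A (Python) =====
-- def _decode_optical_port_status(command_body):
--     if len(command_body) == 0:
--         return {}
--     hex_as_int = command_body[0]
--     hex_as_binary = bin(hex_as_int)
--     padded_binary = hex_as_binary[2:].zfill(8)
--     opt = 1
--     temp = []
--     for bit in reversed(padded_binary):
--         if bit == '0' and opt <= 4:
--             temp.append('Connected ')
--         elif bit == '1' and opt <= 4:
--             temp.append('Disconnected ')
--         elif bit == '0' and opt > 4:
--             temp.append('Normal')
--         elif bit == '1' and opt > 4: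
--             temp.append('Failure')
--         opt = opt + 1
--     parameter_dict = dict()
--
--     parameter_dict['opt1ConnectionStatus'] = temp[0]
--     parameter_dict['opt2ConnectionStatus'] = temp[1]
--     parameter_dict['opt3ConnectionStatus'] = temp[2]
--     parameter_dict['opt4ConnectionStatus'] = temp[3]
--     parameter_dict['opt1TransmissionStatus'] = temp[4]
--     parameter_dict['opt2TransmissionStatus'] = temp[5]
--     parameter_dict['opt3TransmissionStatus'] = temp[6]
--     parameter_dict['opt4TransmissionStatus'] = temp[7]
--     return parameter_dict
-- ===== SOURCE B (Python) =====
-- def _decode_optical_port_status(command_body):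
--     if len(command_body) == 0:
--         return {}
--     byte = command_body[0]
--     parameter_dict = {}
--     for i in range(4):
--         parameter_dict['opt%dConnectionStatus' % (i + 1)] = \
--             'Disconnected ' if (byte >> i) & 1 else 'Connected '
--     for i in range(4):
--         parameter_dict['opt%dTransmissionStatus' % (i + 1)] = \
--             'Failure' if (byte >> (i + 4)) & 1 else 'Normal'
--     return parameter_dict
-- ===== Notes on version B (the rewrite author's own statement) =====
-- stated objective: simpler
-- what changed: Replaces bin()/zfill/reversed-string walk with a temp list and eight positional reads by direct dict construction extracting each bit with (byte >> i) & 1.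
import Mathlib
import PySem

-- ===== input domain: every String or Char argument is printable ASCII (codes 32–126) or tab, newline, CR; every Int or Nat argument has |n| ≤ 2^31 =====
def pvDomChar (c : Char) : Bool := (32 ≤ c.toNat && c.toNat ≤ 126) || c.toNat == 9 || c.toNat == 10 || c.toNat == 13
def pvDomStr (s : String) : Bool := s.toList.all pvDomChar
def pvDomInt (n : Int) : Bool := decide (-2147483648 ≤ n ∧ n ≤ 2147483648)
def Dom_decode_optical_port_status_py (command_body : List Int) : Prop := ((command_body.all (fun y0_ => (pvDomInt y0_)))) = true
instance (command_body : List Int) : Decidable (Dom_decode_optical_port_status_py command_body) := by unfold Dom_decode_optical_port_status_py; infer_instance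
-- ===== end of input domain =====

-- B builds the status dict directly from the bits of the first byte ((byte >> i) & 1),
-- replacing A's bin()/zfill binary-string walk and positional temp list; same return value on Pre_.

-- ===== PORT A =====
-- loop body of `for bit in reversed(padded_binary)`: state = (temp, opt)
def pvStep (st : List String × Int) (bit : Char) : List String × Int :=
  if bit = '0' ∧ st.2 ≤ 4 then (st.1 ++ ["Connected "], st.2 + 1)
  else if bit = '1' ∧ st.2 ≤ 4 then (st.1 ++ ["Disconnected "], st.2 + 1)
  else if bit = '0' ∧ st.2 > 4 then (st.1 ++ ["Normal"], st.2 + 1)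
  else if bit = '1' ∧ st.2 > 4 then (st.1 ++ ["Failure"], st.2 + 1)
  else (st.1, st.2 + 1)

def decode_optical_port_status_py (command_body : List Int) : List (String × String) :=
  if command_body.length = 0 then []
  else
    let hex_as_int := command_body.headD 0      -- command_body[0]; exact: the list is nonempty here
    let hex_as_binary := PySem.Int.toBinChars0b hex_as_int        -- bin(hex_as_int)
    let padded_binary := PySem.Chars.zfill (hex_as_binary.drop 2) 8   -- [2:].zfill(8); drop 2 exact for this nonneg slice start
    let temp := (padded_binary.reverse.foldl pvStep ([], 1)).1
    -- temp[k] raises IndexError when temp has < 8 entries; that happens only outside Pre_, where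
    -- the getD default is never read
    [("opt1ConnectionStatus", temp.getD 0 ""),
     ("opt2ConnectionStatus", temp.getD 1 ""),
     ("opt3ConnectionStatus", temp.getD 2 ""),
     ("opt4ConnectionStatus", temp.getD 3 ""),
     ("opt1TransmissionStatus", temp.getD 4 ""),
     ("opt2TransmissionStatus", temp.getD 5 ""),
     ("opt3TransmissionStatus", temp.getD 6 ""),
     ("opt4TransmissionStatus", temp.getD 7 "")]

-- ===== PORT B =====
def decode_optical_port_status_py_alt (command_body : List Int) : List (String × String) :=
  match command_body with
  | [] => []
  | byte :: _ =>
    ((List.range 4).map (fun (i : Nat) =>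
      ("opt" ++ PySem.Int.toStr ((i : Int) + 1) ++ "ConnectionStatus",
       if PySem.Int.band (byte >>> i) 1 = 1 then "Disconnected " else "Connected "))) ++
    ((List.range 4).map (fun (i : Nat) =>
      ("opt" ++ PySem.Int.toStr ((i : Int) + 1) ++ "TransmissionStatus",
       if PySem.Int.band (byte >>> (i + 4)) 1 = 1 then "Failure" else "Normal")))

-- ===== PRECONDITION & SPEC =====
-- Pre_ excludes a negative first byte — outside the one-byte domain this decoder reads: there A
-- either raises IndexError (first byte in -127..-1) or returns an accidental decode of the binary
-- digits of |n| (first byte ≤ -128), an artefact of slicing '-0b…' with [2:].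
def Pre_decode_optical_port_status_py (command_body : List Int) : Prop :=
  0 ≤ command_body.headD 0
instance (command_body : List Int) : Decidable (Pre_decode_optical_port_status_py command_body) := by unfold Pre_decode_optical_port_status_py; infer_instance

def pvWitness_decode_optical_port_status_py : List Int := [200]

def Spec_decode_optical_port_status_py (command_body : List Int) (out : List (String × String)) : Prop := out = decode_optical_port_status_py_alt command_body
instance (command_body : List Int) (out : List (String × String)) : Decidable (Spec_decode_optical_port_status_py command_body out) := by unfold Spec_decode_optical_port_status_py; infer_instance

-- ===== CLAIM (what is proved, stated in full; the proofs are below) =====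
def Claim_equal_decode_optical_port_status_py : Prop := ∀ (command_body : List Int), Dom_decode_optical_port_status_py command_body → Pre_decode_optical_port_status_py command_body → Spec_decode_optical_port_status_py command_body (decode_optical_port_status_py command_body)


-- ===== LEMMAS AND PROOFS =====

-- the value A's loop appends for a binary digit `c` at 1-based position `o`
def pvVal (c : Char) (o : Int) : String :=
  if o ≤ 4 then (if c = '1' then "Disconnected " else "Connected ")
  else (if c = '1' then "Failure" else "Normal")

def pvMapOpt : List Char → Int → List String
  | [], _ => []
  | c :: cs, o => pvVal c o :: pvMapOpt cs (o + 1)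

-- the common reference value: the 8 statuses read off the low 8 bits of n
def pvRef (n : Nat) : List (String × String) :=
  [("opt1ConnectionStatus", if n.testBit 0 then "Disconnected " else "Connected "),
   ("opt2ConnectionStatus", if n.testBit 1 then "Disconnected " else "Connected "),
   ("opt3ConnectionStatus", if n.testBit 2 then "Disconnected " else "Connected "),
   ("opt4ConnectionStatus", if n.testBit 3 then "Disconnected " else "Connected "),
   ("opt1TransmissionStatus", if n.testBit 4 then "Failure" else "Normal"),
   ("opt2TransmissionStatus", if n.testBit 5 then "Failure" else "Normal"),
   ("opt3TransmissionStatus", if n.testBit 6 then "Failure" else "Normal"),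
   ("opt4TransmissionStatus", if n.testBit 7 then "Failure" else "Normal")]

lemma pvToDigits2_mem (n : Nat) : ∀ c ∈ Nat.toDigits 2 n, c = '0' ∨ c = '1' := by
  induction n using Nat.strong_induction_on with
  | _ n ih =>
    rw [Nat.toDigits_eq_if (by norm_num)]
    split
    · intro c hc
      simp at hc
      subst hc
      interval_cases n <;> simp [Nat.digitChar]
    · intro c hc
      rcases List.mem_append.1 hc with h | h
      · exact ih (n / 2) (by omega) c h
      · simp at h
        subst h
        have : n % 2 = 0 ∨ n % 2 = 1 := by omega
        rcases this with h | h <;> simp [h, Nat.digitChar]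

lemma pvBits_getD (n : Nat) : ∀ (i : Nat),
    (Nat.toDigits 2 n).reverse.getD i '0' = if n.testBit i then '1' else '0' := by
  induction n using Nat.strong_induction_on with
  | _ n ih =>
    intro i
    rw [Nat.toDigits_eq_if (by norm_num)]
    split
    · rename_i h
      cases i with
      | zero => interval_cases n <;> simp [Nat.digitChar, Nat.testBit]
      | succ j =>
        have : n.testBit (j+1) = false := Nat.testBit_eq_false_of_lt (by
          calc n < 2^1 := by omega
          _ ≤ 2^(j+1) := Nat.pow_le_pow_right (by norm_num) (by omega))
        simp [this]
    · rename_i h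
      rw [List.reverse_append]
      cases i with
      | zero =>
        have h2 : n % 2 = 0 ∨ n % 2 = 1 := by omega
        rcases h2 with h2 | h2 <;> simp [Nat.testBit_zero, h2, Nat.digitChar]
      | succ j =>
        simp only [List.reverse_cons, List.reverse_nil, List.nil_append, List.cons_append,
          List.getD_cons_succ]
        rw [ih (n / 2) (by omega) j]
        simp [Nat.testBit_add_one]

lemma pvZfill_eq (n : Nat) :
    PySem.Chars.zfill (Nat.toDigits 2 n) 8
      = List.replicate (8 - (Nat.toDigits 2 n).length) '0' ++ Nat.toDigits 2 n := by
  set s := Nat.toDigits 2 n with hs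
  unfold PySem.Chars.zfill
  split
  · rename_i h
    have : (8 : Int) ≤ s.length → 8 - s.length = 0 := by omega
    simp [this h]
  · rename_i h
    have hpos : 0 < s.length := Nat.length_toDigits_pos
    cases hsc : s with
    | nil => rw [hsc] at hpos; simp at hpos
    | cons c rest =>
      have hc : c = '0' ∨ c = '1' := pvToDigits2_mem n c (by rw [← hs, hsc]; simp)
      have hns : ¬ (c = '+' ∨ c = '-') := by rcases hc with h | h <;> subst h <;> decide
      simp only [hns]
      have h8 : (8:Int).toNat = 8 := by decide
      rw [h8]
      rfl

lemma pvPadded_getD (n i : Nat) :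
    (List.replicate (8 - (Nat.toDigits 2 n).length) '0' ++ Nat.toDigits 2 n).reverse.getD i '0'
      = if n.testBit i then '1' else '0' := by
  set s := Nat.toDigits 2 n with hs
  rw [List.reverse_append]
  by_cases hi : i < s.length
  · rw [List.getD_append _ _ _ _ (by simpa using hi)]
    exact pvBits_getD n i
  · have hnlt : n < 2 ^ s.length := by
      rw [hs]
      exact (Nat.length_toDigits_le_iff (by norm_num) Nat.length_toDigits_pos).1 le_rfl
    have hbit : n.testBit i = false := Nat.testBit_eq_false_of_lt
      (lt_of_lt_of_le hnlt (Nat.pow_le_pow_right (by norm_num) (by omega)))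
    rw [hbit]
    simp only [if_false, Bool.false_eq_true]
    rw [List.getD_append_right _ _ _ _ (by simpa using Nat.le_of_not_lt hi)]
    rcases lt_or_ge (i - s.length) (8 - s.length) with h | h
    · simp [List.getD_eq_getElem?_getD, h]
    · simp [List.getD_eq_getElem?_getD, Nat.not_lt.2 h]

lemma pvFoldl_step (l : List Char) (h01 : ∀ c ∈ l, c = '0' ∨ c = '1') :
    ∀ (t0 : List String) (o : Int), l.foldl pvStep (t0, o) = (t0 ++ pvMapOpt l o, o + l.length) := by
  induction l with
  | nil => intro t0 o; simp [pvMapOpt]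
  | cons c cs ih =>
    intro t0 o
    have hc : c = '0' ∨ c = '1' := h01 c (by simp)
    have hstep : pvStep (t0, o) c = (t0 ++ [pvVal c o], o + 1) := by
      rcases hc with h | h <;> subst h <;>
        by_cases ho : o ≤ 4 <;> simp [pvStep, pvVal, ho]
    rw [List.foldl_cons, hstep, ih (fun c hc => h01 c (by simp [hc]))]
    simp [pvMapOpt]
    ring

lemma pvMapOpt_getD (l : List Char) : ∀ (o : Int) (i : Nat), i < l.length →
    (pvMapOpt l o).getD i "" = pvVal (l.getD i '0') (o + i) := by
  induction l with
  | nil => intro o i h; simp at h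
  | cons c cs ih =>
    intro o i h
    cases i with
    | zero => simp [pvMapOpt]
    | succ j =>
      simp only [pvMapOpt, List.getD_cons_succ]
      rw [ih (o+1) j (by simpa using h)]
      congr 1
      push_cast
      ring

lemma pvA_eq_ref (x : Int) (t : List Int) (hx : 0 ≤ x) :
    decode_optical_port_status_py (x :: t) = pvRef x.toNat := by
  set n := x.toNat with hn
  unfold decode_optical_port_status_py
  rw [if_neg (by simp)]
  simp only [List.headD_cons]
  have hbin : PySem.Int.toBinChars0b x = '0' :: 'b' :: Nat.toDigits 2 n := by
    unfold PySem.Int.toBinChars0b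
    rw [if_neg (by omega)]
  rw [hbin]
  simp only [List.drop]
  rw [pvZfill_eq n]
  set padded := List.replicate (8 - (Nat.toDigits 2 n).length) '0' ++ Nat.toDigits 2 n with hpad
  have h01 : ∀ c ∈ padded.reverse, c = '0' ∨ c = '1' := by
    intro c hc
    rw [List.mem_reverse, hpad, List.mem_append] at hc
    rcases hc with h | h
    · left; exact List.eq_of_mem_replicate h
    · exact pvToDigits2_mem n c h
  rw [pvFoldl_step padded.reverse h01 [] 1]
  have hlen : 8 ≤ padded.reverse.length := by
    rw [List.length_reverse, hpad, List.length_append, List.length_replicate]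
    omega
  have hget : ∀ i : Nat, i < 8 →
      (pvMapOpt padded.reverse 1).getD i "" = pvVal (if n.testBit i then '1' else '0') (1 + i) := by
    intro i hi
    rw [pvMapOpt_getD padded.reverse 1 i (by omega), hpad, pvPadded_getD n i]
  simp only [List.nil_append]
  rw [hget 0 (by norm_num), hget 1 (by norm_num), hget 2 (by norm_num), hget 3 (by norm_num),
      hget 4 (by norm_num), hget 5 (by norm_num), hget 6 (by norm_num), hget 7 (by norm_num)]
  unfold pvRef
  by_cases h0 : n.testBit 0 <;> by_cases h1 : n.testBit 1 <;> by_cases h2 : n.testBit 2 <;>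
    by_cases h3 : n.testBit 3 <;> by_cases h4 : n.testBit 4 <;> by_cases h5 : n.testBit 5 <;>
    by_cases h6 : n.testBit 6 <;> by_cases h7 : n.testBit 7 <;>
    simp [h0, h1, h2, h3, h4, h5, h6, h7, pvVal]

lemma pvBandBit (x : Int) (hx : 0 ≤ x) (k : Nat) :
    (PySem.Int.band (x >>> k) 1 = 1) ↔ x.toNat.testBit k := by
  obtain ⟨n, rfl⟩ : ∃ n : Nat, x = (n : Int) := ⟨x.toNat, by omega⟩
  have h1 : (n : Int) >>> k = ((n >>> k : Nat) : Int) := by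
    simp [Int.shiftRight_eq_div_pow, Nat.shiftRight_eq_div_pow]
  rw [h1, show (1:Int) = ((1:Nat):Int) from rfl, PySem.Int.band_natCast, Int.toNat_natCast,
    Nat.testBit, Nat.cast_inj]
  simp [Nat.and_one_is_mod]

lemma pvB_eq_ref (x : Int) (t : List Int) (hx : 0 ≤ x) :
    decode_optical_port_status_py_alt (x :: t) = pvRef x.toNat := by
  unfold decode_optical_port_status_py_alt
  have hr : List.range 4 = [0, 1, 2, 3] := by decide
  rw [hr]
  unfold pvRef
  have hb : ∀ k : Nat, (PySem.Int.band (x >>> k) 1 = 1) = x.toNat.testBit k := by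
    intro k; exact propext (by rw [pvBandBit x hx k])
  simp only [List.map, List.cons_append, List.nil_append, List.cons.injEq, Prod.mk.injEq, hb]
  decide

-- ===== VERDICT (by name: the statement is the Claim_ definition above) =====
theorem decode_optical_port_status_py_spec : Claim_equal_decode_optical_port_status_py := by
  intro cb _ hpre
  unfold Spec_decode_optical_port_status_py
  cases cb with
  | nil => rfl
  | cons x t =>
    have hx : 0 ≤ x := hpre
    rw [pvA_eq_ref x t hx, pvB_eq_ref x t hx]
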